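-- pv_equiv track=rewrite | github.com/harshitha241291/algovisual | app.py | generate_heap_sort_steps
-- ===== SOURCE A (Python) =====
-- def generate_heap_sort_steps(arr):
--     steps = []
--     a = arr.copy()
--
--     def heapify(n, i):
--         largest = i
--         l = 2 * i + 1
--         r = 2 * i + 2
--
--         if l < n and a[l] > a[largest]:
--             largest = l
--         if r < n and a[r] > a[largest]:
--             largest = r
--         if largest != i:
--             steps.append((a.copy(), (i, largest), False))
--             a[i], a[largest] = a[largest], a[i]
--             steps.append((a.copy(), (i, largest), True))
--             heapify(n, largest)
--
--     n = len(a)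
--     for i in range(n // 2 - 1, -1, -1):
--         heapify(n, i)
--
--     for i in range(n - 1, 0, -1):
--         steps.append((a.copy(), (0, i), False))
--         a[i], a[0] = a[0], a[i]
--         steps.append((a.copy(), (0, i), True))
--         heapify(i, 0)
--
--     return steps
-- ===== SOURCE B (Python) =====
-- def generate_heap_sort_steps(arr):
--     # Iterative sift-down, pure state-passing: each sift returns (new array, its own
--     # step list); "largest" is computed as the first-maximal index via max().
--     def sift(a, n, i):
--         out = []
--         while True:
--             cand = [j for j in (i, 2 * i + 1, 2 * i + 2) if j < n]
--             largest = max(cand, key=lambda j: a[j])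
--             if largest == i:
--                 return a, out
--             out.append((a.copy(), (i, largest), False))
--             a = a.copy()
--             a[i], a[largest] = a[largest], a[i]
--             out.append((a.copy(), (i, largest), True))
--             i = largest
--
--     a = list(arr)
--     n = len(a)
--     steps = []
--     for i in range(n // 2 - 1, -1, -1):
--         a, s = sift(a, n, i)
--         steps += s
--     for end in range(n - 1, 0, -1):
--         pre = a.copy()
--         a = a.copy()
--         a[end], a[0] = a[0], a[end]
--         steps += [(pre, (0, end), False), (a.copy(), (0, end), True)]
--         a, s = sift(a, end, 0)
--         steps += s
--     return steps
-- ===== Notes on version B (the rewrite author's own statement) =====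
-- stated objective: alternative
-- what changed: Recursive in-place heapify is replaced by an iterative state-passing sift-down that computes 'largest' as max() over the in-range candidate indices and returns its own step list, which the driver concatenates.
import Mathlib
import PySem

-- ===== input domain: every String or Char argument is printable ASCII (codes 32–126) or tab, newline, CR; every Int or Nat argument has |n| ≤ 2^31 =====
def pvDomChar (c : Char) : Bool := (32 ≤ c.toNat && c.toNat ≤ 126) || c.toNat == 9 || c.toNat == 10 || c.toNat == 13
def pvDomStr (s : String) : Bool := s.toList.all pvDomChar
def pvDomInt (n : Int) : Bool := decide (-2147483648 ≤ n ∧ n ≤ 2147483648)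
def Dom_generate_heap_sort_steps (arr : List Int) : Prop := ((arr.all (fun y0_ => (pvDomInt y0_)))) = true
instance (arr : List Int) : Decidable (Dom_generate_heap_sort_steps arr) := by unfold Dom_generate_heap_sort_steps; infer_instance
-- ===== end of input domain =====

-- B replaces A's recursive heapify by an iterative, state-passing sift-down whose
-- "largest" is computed with max() over the in-range candidate indices (objective:
-- alternative decomposition, same cost). A mutates only its local copy of arr, so
-- the return value is the whole observable behaviour.

-- Python's simultaneous swap a[i], a[j] = a[j], a[i] (both indices in range at every use)
def pvSwap (a : List Int) (i j : Nat) : List Int :=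
  (a.set i (a.getD j 0)).set j (a.getD i 0)

-- ===== PORT A =====
-- A's chained-if computation of `largest` (the two ifs of heapify, verbatim);
-- list indexing is ported with getD: every access in A is in range (l < n, r < n ≤ a.length)
def chooseLargest (n : Nat) (a : List Int) (i : Nat) : Nat :=
  if 2 * i + 2 < n ∧
      a.getD (if 2 * i + 1 < n ∧ a.getD i 0 < a.getD (2 * i + 1) 0 then 2 * i + 1 else i) 0
        < a.getD (2 * i + 2) 0 then 2 * i + 2
  else if 2 * i + 1 < n ∧ a.getD i 0 < a.getD (2 * i + 1) 0 then 2 * i + 1 else i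

-- termination of heapify: a largest ≠ i is a child index, in range
theorem chooseLargest_gt {n : Nat} {a : List Int} {i : Nat} (h : chooseLargest n a i ≠ i) :
    i < chooseLargest n a i ∧ chooseLargest n a i < n := by
  unfold chooseLargest at h ⊢
  split_ifs at h ⊢ <;> omega

-- recursive heapify, threading the shared mutable state (a, steps)
def heapifyA (n : Nat) (a : List Int) (steps : List (List Int × (Int × Int) × Bool)) (i : Nat) :
    List Int × List (List Int × (Int × Int) × Bool) :=
  let largest := chooseLargest n a i
  if hL : largest ≠ i then
    let steps := steps ++ [(a, ((i : Int), (largest : Int)), false)]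
    let a' := pvSwap a i largest
    let steps := steps ++ [(a', ((i : Int), (largest : Int)), true)]
    heapifyA n a' steps largest
  else (a, steps)
termination_by n - i
decreasing_by have := chooseLargest_gt hL; omega

def generate_heap_sort_steps (arr : List Int) : List (List Int × (Int × Int) × Bool) :=
  let n := arr.length
  -- for i in range(n//2 - 1, -1, -1): heapify(n, i)
  let st := (List.range (n / 2)).reverse.foldl
    (fun (st : List Int × List (List Int × (Int × Int) × Bool)) (i : Nat) => heapifyA n st.1 st.2 i)
    (arr, [])
  -- for i in range(n - 1, 0, -1): append, swap, append, heapify(i, 0)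
  let st := (List.range' 1 (n - 1)).reverse.foldl
    (fun (st : List Int × List (List Int × (Int × Int) × Bool)) (i : Nat) =>
      let steps := st.2 ++ [(st.1, ((0 : Int), (i : Int)), false)]
      let a' := pvSwap st.1 i 0
      let steps := steps ++ [(a', ((0 : Int), (i : Int)), true)]
      heapifyA i a' steps 0)
    st
  st.2

-- ===== PORT B =====
-- B's `largest = max(cand, key=lambda j: a[j])` over the in-range candidates;
-- PySem.List.max? is Python's max (first extremal); cand is nonempty wherever sift
-- is reached (i < n), so the Option default i is never used
def bLargest (n : Nat) (a : List Int) (i : Nat) : Nat :=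
  (PySem.List.max? ([i, 2 * i + 1, 2 * i + 2].filter (fun j => j < n))
    (fun j => a.getD j 0)).getD i

-- termination of sift: a first-maximal candidate ≠ i is a child index, in range
theorem bLargest_dec {n : Nat} {a : List Int} {i : Nat} (h : ¬ bLargest n a i = i) :
    n - bLargest n a i < n - i := by
  unfold bLargest at h ⊢
  cases hm : PySem.List.max? ([i, 2 * i + 1, 2 * i + 2].filter (fun j => j < n))
      (fun j => a.getD j 0) with
  | none => rw [hm] at h; simp at h
  | some m =>
    rw [hm] at h
    have hmem := PySem.List.max?_mem hm
    simp only [List.mem_filter, List.mem_cons, List.not_mem_nil, or_false,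
      decide_eq_true_eq] at hmem
    simp only [Option.getD_some] at h ⊢
    omega


-- iterative while-True sift-down, pure: the state (a, out) is passed explicitly
def siftB (n i : Nat) (a : List Int) (out : List (List Int × (Int × Int) × Bool)) :
    List Int × List (List Int × (Int × Int) × Bool) :=
  let largest := bLargest n a i
  if h : largest = i then (a, out)
  else
    siftB n largest (pvSwap a i largest)
      (out ++ [(a, ((i : Int), (largest : Int)), false),
               (pvSwap a i largest, ((i : Int), (largest : Int)), true)])
termination_by n - i
decreasing_by exact bLargest_dec h

def generate_heap_sort_steps_alt (arr : List Int) : List (List Int × (Int × Int) × Bool) :=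
  let n := arr.length
  let st := (List.range (n / 2)).reverse.foldl
    (fun (st : List Int × List (List Int × (Int × Int) × Bool)) (i : Nat) =>
      let r := siftB n i st.1 []
      (r.1, st.2 ++ r.2))
    (arr, [])
  let st := (List.range' 1 (n - 1)).reverse.foldl
    (fun (st : List Int × List (List Int × (Int × Int) × Bool)) (e : Nat) =>
      let a := pvSwap st.1 e 0
      let steps := st.2 ++ [(st.1, ((0 : Int), (e : Int)), false),
                            (a, ((0 : Int), (e : Int)), true)]
      let r := siftB e 0 a []
      (r.1, steps ++ r.2))
    st
  st.2

-- ===== PRECONDITION & SPEC =====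
def Spec_generate_heap_sort_steps (arr : List Int) (out : List (List Int × (Int × Int) × Bool)) : Prop := out = generate_heap_sort_steps_alt arr
instance (arr : List Int) (out : List (List Int × (Int × Int) × Bool)) : Decidable (Spec_generate_heap_sort_steps arr out) := by unfold Spec_generate_heap_sort_steps; infer_instance

-- ===== CLAIM (what is proved, stated in full; the proofs are below) =====
def Claim_equal_generate_heap_sort_steps : Prop := ∀ (arr : List Int), Dom_generate_heap_sort_steps arr → Spec_generate_heap_sort_steps arr (generate_heap_sort_steps arr)

-- ===== LEMMAS AND PROOFS =====

-- B's max() over candidates computes exactly A's chained-if largest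
theorem largest_eq (n : Nat) (a : List Int) (i : Nat) :
    bLargest n a i = chooseLargest n a i := by
  unfold bLargest chooseLargest
  by_cases hi : i < n
  · by_cases hl : 2 * i + 1 < n
    · by_cases hr : 2 * i + 2 < n
      · simp only [List.filter, hi, hl, hr, decide_true, PySem.List.max?, List.foldl,
          true_and]
        by_cases h1 : a.getD i 0 < a.getD (2 * i + 1) 0
        · simp only [h1, if_true]
          split_ifs <;> simp
        · simp only [h1, if_false]
          split_ifs <;> simp
      · simp only [List.filter, hi, hl, hr, decide_true, decide_false, PySem.List.max?,
          List.foldl, true_and, false_and, if_false]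
        by_cases h1 : a.getD i 0 < a.getD (2 * i + 1) 0 <;>
          simp only [h1, if_true, if_false] <;> simp
    · have hr : ¬ 2 * i + 2 < n := by omega
      simp only [List.filter, hi, hl, hr, decide_true, decide_false, PySem.List.max?,
        List.foldl, false_and, if_false]
      simp
  · have hl : ¬ 2 * i + 1 < n := by omega
    have hr : ¬ 2 * i + 2 < n := by omega
    simp only [List.filter, hi, hl, hr, decide_false, PySem.List.max?, List.foldl,
      false_and, if_false]
    simp

-- one-step unfolding of siftB (its equation, stated without the dependent if)
theorem siftB_unfold (n i : Nat) (a : List Int) (out : List (List Int × (Int × Int) × Bool)) :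
    siftB n i a out =
      (if bLargest n a i = i then (a, out)
       else
        siftB n (bLargest n a i) (pvSwap a i (bLargest n a i))
          (out ++ [(a, ((i : Int), (bLargest n a i : Int)), false),
                   (pvSwap a i (bLargest n a i), ((i : Int), (bLargest n a i : Int)), true)])) := by
  rw [siftB]
  split_ifs <;> simp

-- the step accumulator of siftB factors out
theorem siftB_acc_aux (n k : Nat) : ∀ (i : Nat) (a : List Int)
    (out : List (List Int × (Int × Int) × Bool)), n - i ≤ k →
    siftB n i a out = ((siftB n i a []).1, out ++ (siftB n i a []).2) := by
  induction k with
  | zero =>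
    intro i a out hk
    rw [siftB_unfold n i a out, siftB_unfold n i a []]
    have : bLargest n a i = i := by
      by_contra h
      have := bLargest_dec h
      omega
    simp [this]
  | succ k ih =>
    intro i a out hk
    rw [siftB_unfold n i a out, siftB_unfold n i a []]
    by_cases h : bLargest n a i = i
    · simp [h]
    · have hd := bLargest_dec h
      simp only [h, if_false]
      rw [ih _ _ _ (by omega), ih _ _ ([] ++ _) (by omega)]
      simp

theorem siftB_acc (n i : Nat) (a : List Int) (out : List (List Int × (Int × Int) × Bool)) :
    siftB n i a out = ((siftB n i a []).1, out ++ (siftB n i a []).2) :=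
  siftB_acc_aux n (n - i) i a out le_rfl

-- one-step unfolding of heapifyA
theorem heapifyA_unfold (n : Nat) (a : List Int) (steps : List (List Int × (Int × Int) × Bool)) (i : Nat) :
    heapifyA n a steps i =
      (if chooseLargest n a i ≠ i then
        heapifyA n (pvSwap a i (chooseLargest n a i))
          (steps ++ [(a, ((i : Int), (chooseLargest n a i : Int)), false)]
                 ++ [(pvSwap a i (chooseLargest n a i), ((i : Int), (chooseLargest n a i : Int)), true)])
          (chooseLargest n a i)
       else (a, steps)) := by
  rw [heapifyA]
  split_ifs <;> simp

-- A's recursive heapify = B's iterative sift, with the steps accumulated behind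
theorem heapify_eq_sift_aux (n k : Nat) : ∀ (i : Nat) (a : List Int)
    (steps : List (List Int × (Int × Int) × Bool)), n - i ≤ k →
    heapifyA n a steps i = ((siftB n i a []).1, steps ++ (siftB n i a []).2) := by
  induction k with
  | zero =>
    intro i a steps hk
    rw [heapifyA_unfold, siftB_unfold]
    have : chooseLargest n a i = i := by
      by_contra h
      have := chooseLargest_gt h
      omega
    simp [this, largest_eq]
  | succ k ih =>
    intro i a steps hk
    rw [heapifyA_unfold, siftB_unfold, largest_eq]
    by_cases h : chooseLargest n a i = i
    · simp [h]
    · have hd := chooseLargest_gt h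
      simp only [h, ne_eq, not_false_iff, if_true, List.nil_append]
      rw [ih _ _ _ (by omega)]
      rw [siftB_acc n (chooseLargest n a i) (pvSwap a i (chooseLargest n a i))
        [(a, ((i : Int), (chooseLargest n a i : Int)), false),
         (pvSwap a i (chooseLargest n a i), ((i : Int), (chooseLargest n a i : Int)), true)]]
      simp

theorem heapify_eq_sift (n i : Nat) (a : List Int) (steps : List (List Int × (Int × Int) × Bool)) :
    heapifyA n a steps i = ((siftB n i a []).1, steps ++ (siftB n i a []).2) :=
  heapify_eq_sift_aux n (n - i) i a steps le_rfl

-- ===== VERDICT (by name: the statement is the Claim_ definition above) =====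
theorem generate_heap_sort_steps_spec : Claim_equal_generate_heap_sort_steps := by
  intro arr _
  show generate_heap_sort_steps arr = generate_heap_sort_steps_alt arr
  simp only [generate_heap_sort_steps, generate_heap_sort_steps_alt, heapify_eq_sift,
    List.append_assoc, List.cons_append, List.nil_append]
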